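-- pv_equiv track=rewrite | github.com/Muhammad-Aqib-92/My_Work | Ai/jug.py | ids_solve
-- ===== SOURCE A (Python) =====
-- def ids_solve(capacities, target):
--     def dls(state, path, depth):
--         if target in state:
--             return path + [state]
--         if depth == 0:
--             return None
--         visited.add(state)
--         for next_state in get_next_states(state, capacities):
--             if next_state not in visited:
--                 result = dls(next_state, path + [state], depth - 1)
--                 if result:
--                     return result
--         return None
--     for depth in range(100):
--         visited = set()
--         result = dls((capacities[0], 0, 0), [], depth)
--         if result:
--             return result
--     return None
--
-- def get_next_states(state, capacities):
--     next_states = []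
--     jugs = list(state)
--     total_water = sum(jugs)
--
--     for i in range(3):
--         fill = jugs[:]
--         fill[i] = capacities[i]
--         next_states.append(tuple(fill))
--
--         empty = jugs[:]
--         empty[i] = 0
--         next_states.append(tuple(empty))
--
--     for i in range(3):
--         for j in range(3):
--             if i != j:
--                 pour = jugs[:]
--                 transfer = min(jugs[i], capacities[j] - jugs[j])
--                 pour[i] -= transfer
--                 pour[j] += transfer
--                 next_states.append(tuple(pour))
--
--     return [state for state in next_states if sum(state) == total_water]
-- ===== SOURCE B (Python) =====
-- def ids_solve(capacities, target):
--     start = (capacities[0], 0, 0)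
--     for depth in range(100):
--         visited = set()
--         stack = [(start, [], depth)]
--         while stack:
--             state, path, d = stack.pop()
--             if target in state:
--                 return path + [state]
--             if d == 0:
--                 continue
--             if state in visited:
--                 continue
--             visited.add(state)
--             for nxt in reversed(get_next_states(state, capacities)):
--                 stack.append((nxt, path + [state], d - 1))
--     return None
--
-- def get_next_states(state, capacities):
--     next_states = []
--     jugs = list(state)
--     total_water = sum(jugs)
--     for i in range(3):
--         fill = jugs[:]
--         fill[i] = capacities[i]
--         next_states.append(tuple(fill))
--         empty = jugs[:]
--         empty[i] = 0
--         next_states.append(tuple(empty))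
--     for i in range(3):
--         for j in range(3):
--             if i != j:
--                 pour = jugs[:]
--                 transfer = min(jugs[i], capacities[j] - jugs[j])
--                 pour[i] -= transfer
--                 pour[j] += transfer
--                 next_states.append(tuple(pour))
--     return [s for s in next_states if sum(s) == total_water]
-- ===== Notes on version B (the rewrite author's own statement) =====
-- stated objective: alternative
-- what changed: The recursive depth-limited search inside the IDS loop is replaced by an explicit LIFO stack of (state, path, depth) frames, with visited checked and marked at pop/expansion time and children pushed in reversed order so the traversal and returned path are identical.
import Mathlib
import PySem

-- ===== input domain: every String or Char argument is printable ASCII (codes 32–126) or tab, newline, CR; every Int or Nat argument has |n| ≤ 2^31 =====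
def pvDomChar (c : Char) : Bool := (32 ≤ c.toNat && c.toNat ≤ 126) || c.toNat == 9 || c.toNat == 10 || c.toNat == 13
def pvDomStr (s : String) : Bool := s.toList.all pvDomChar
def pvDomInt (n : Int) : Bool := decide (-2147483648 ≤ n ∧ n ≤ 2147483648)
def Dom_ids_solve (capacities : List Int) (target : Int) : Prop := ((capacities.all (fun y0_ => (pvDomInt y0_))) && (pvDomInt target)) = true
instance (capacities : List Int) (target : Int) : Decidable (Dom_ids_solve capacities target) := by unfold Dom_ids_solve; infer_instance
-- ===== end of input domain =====

-- B replaces A's recursive depth-limited search by an explicit LIFO-stack loop (same IDS outer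
-- loop, same visited discipline at expansion time); equivalence is about return values only.

-- ===== PORT A =====
-- `target in state` for the 3-tuple state
def pvHit (target : Int) (s : Int × Int × Int) : Bool :=
  target == s.1 || target == s.2.1 || target == s.2.2

-- tuple(l) for the length-3 working lists of get_next_states
def pvTup3 (l : List Int) : Int × Int × Int := (l.getD 0 0, l.getD 1 0, l.getD 2 0)

-- port of helper get_next_states (capacities[i] as getD: Pre_ keeps every call in range)
def get_next_statesL (state : Int × Int × Int) (capacities : List Int) : List (Int × Int × Int) :=
  let jugs : List Int := [state.1, state.2.1, state.2.2]
  let total_water := jugs.sum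
  let fe := (PySem.List.pyRange 0 3 1).foldl (fun acc i =>
      let fill := jugs.set i.toNat (capacities.getD i.toNat 0)
      let empty := jugs.set i.toNat 0
      (acc ++ [pvTup3 fill]) ++ [pvTup3 empty]) []
  let all := (PySem.List.pyRange 0 3 1).foldl (fun acc i =>
      (PySem.List.pyRange 0 3 1).foldl (fun acc2 j =>
        if i ≠ j then
          let transfer := min (jugs.getD i.toNat 0) (capacities.getD j.toNat 0 - jugs.getD j.toNat 0)
          let pour := (jugs.set i.toNat (jugs.getD i.toNat 0 - transfer)).set j.toNat
            (jugs.getD j.toNat 0 + transfer)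
          acc2 ++ [pvTup3 pour]
        else acc2) acc) fe
  all.filter (fun t => t.1 + t.2.1 + t.2.2 == total_water)

-- the inner recursive dls, threading the mutable `visited` set; returns (result, visited)
def pv_dls (capacities : List Int) (target : Int) :
    Nat → (Int × Int × Int) → List (Int × Int × Int) → PySem.Set (Int × Int × Int) →
    Option (List (Int × Int × Int)) × PySem.Set (Int × Int × Int)
  | 0, s, p, v => if pvHit target s then (some (p ++ [s]), v) else (none, v)
  | d + 1, s, p, v =>
    if pvHit target s then (some (p ++ [s]), v)
    else
      (get_next_statesL s capacities).foldl (fun acc c =>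
        match acc with
        | (some r, v') => (some r, v')
        | (none, v') =>
          if c ∈ v' then (none, v')
          else pv_dls capacities target d c (p ++ [s]) v')
        ((none : Option (List (Int × Int × Int))), PySem.Set.add v s)

def ids_solve (capacities : List Int) (target : Int) : Option (List (Int × Int × Int)) :=
  (PySem.List.pyRange 0 100 1).foldl (fun acc depth =>
    match acc with
    | some r => some r
    | none => (pv_dls capacities target depth.toNat (capacities.getD 0 0, 0, 0) []
        PySem.Set.empty).1) none

-- ===== PORT B =====
-- lemmas the stack loop's termination measure needs (cited by decreasing_by)
theorem pv_foldl_cons_eq {α β : Type} (f : α → β) :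
    ∀ (l : List α) (rest : List β),
      l.foldl (fun st c => f c :: st) rest = l.reverse.map f ++ rest := by
  intro l
  induction l with
  | nil => intro rest; simp
  | cons c l ih => intro rest; simp [List.foldl, ih (f c :: rest)]

theorem pv_foldl_len_le {α β : Type} (k : Nat) (f : List α → β → List α)
    (hf : ∀ a b, (f a b).length ≤ a.length + k) :
    ∀ (l : List β) (a : List α), (l.foldl f a).length ≤ a.length + k * l.length := by
  intro l
  induction l with
  | nil => intro a; simp
  | cons b l ih =>
    intro a
    rw [List.foldl_cons]
    refine le_trans (ih (f a b)) ?_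
    have := hf a b
    simp only [List.length_cons, Nat.mul_succ]
    omega

theorem pv_gns_len_le (s : Int × Int × Int) (caps : List Int) :
    (get_next_statesL s caps).length ≤ 15 := by
  have hr : (PySem.List.pyRange 0 3 1).length = 3 := by decide
  unfold get_next_statesL
  refine le_trans (List.length_filter_le _ _) ?_
  refine le_trans (pv_foldl_len_le 3 _ (fun a b => ?_) _ _) ?_
  · refine le_trans (pv_foldl_len_le 1 _ (fun a2 b2 => ?_) _ _) (by rw [hr])
    split
    · simp
    · simp
  · rw [hr]
    refine le_trans (Nat.add_le_add_right (pv_foldl_len_le 2 _ (fun a b => by simp) _ _) 9) ?_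
    simp [hr]

theorem pv_measure_push (cs : List (Int × Int × Int)) (p : List (Int × Int × Int)) (d : Nat)
    (rest : List ((Int × Int × Int) × List (Int × Int × Int) × Nat))
    (h : cs.length ≤ 15) (hd : d ≠ 0) :
    (((cs.map (fun c => (c, p, d - 1)) ++ rest)).map (fun f => 16 ^ f.2.2)).sum <
      (16 : Nat) ^ d + (rest.map (fun f => 16 ^ f.2.2)).sum := by
  have hsum : ((cs.map (fun c => (c, p, d - 1))).map
      (fun f : (Int × Int × Int) × List (Int × Int × Int) × Nat => 16 ^ f.2.2)).sum
      = cs.length * 16 ^ (d - 1) := by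
    simp only [List.map_map, Function.comp_def]
    rw [List.map_const', List.sum_replicate, smul_eq_mul]
  have hpow : (16 : Nat) ^ d = 16 * 16 ^ (d - 1) := by
    conv_lhs => rw [show d = (d - 1) + 1 from (Nat.succ_pred_eq_of_pos (Nat.pos_of_ne_zero hd)).symm]
    exact pow_succ' 16 (d - 1)
  have hpos : 0 < (16 : Nat) ^ (d - 1) := Nat.pow_pos (by decide)
  calc (((cs.map fun c => (c, p, d - 1)) ++ rest).map fun f => 16 ^ f.2.2).sum
      = cs.length * 16 ^ (d - 1) + (rest.map fun f => 16 ^ f.2.2).sum := by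
        rw [List.map_append, List.sum_append, hsum]
    _ < 16 ^ d + (rest.map fun f => 16 ^ f.2.2).sum := by
        rw [hpow]
        refine Nat.add_lt_add_right ?_ _
        exact lt_of_le_of_lt (Nat.mul_le_mul_right _ h)
          ((Nat.mul_lt_mul_right hpos).2 (by decide))

-- the explicit-stack depth-limited search of B
def pv_run (capacities : List Int) (target : Int) :
    PySem.Set (Int × Int × Int) → List ((Int × Int × Int) × List (Int × Int × Int) × Nat) →
    Option (List (Int × Int × Int))
  | _, [] => none
  | v, (s, p, d) :: rest =>
    if pvHit target s then some (p ++ [s])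
    else if d = 0 then pv_run capacities target v rest
    else if s ∈ v then pv_run capacities target v rest
    else pv_run capacities target (PySem.Set.add v s)
      ((get_next_statesL s capacities).reverse.foldl (fun st c => (c, p ++ [s], d - 1) :: st) rest)
termination_by _v stack => (stack.map (fun f => 16 ^ f.2.2)).sum
decreasing_by
  · exact Nat.lt_add_of_pos_left (Nat.pow_pos (by decide))
  · exact Nat.lt_add_of_pos_left (Nat.pow_pos (by decide))
  · rw [pv_foldl_cons_eq, List.reverse_reverse]
    exact pv_measure_push _ _ _ _ (pv_gns_len_le _ _) (by assumption)

def ids_solve_alt (capacities : List Int) (target : Int) : Option (List (Int × Int × Int)) :=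
  (PySem.List.pyRange 0 100 1).foldl (fun acc depth =>
    match acc with
    | some r => some r
    | none => pv_run capacities target PySem.Set.empty
        [((capacities.getD 0 0, 0, 0), [], depth.toNat)]) none

-- ===== PRECONDITION & SPEC =====
-- Pre_ excludes only inputs where Python A raises IndexError: capacities with fewer than 3
-- entries, except those whose start state (capacities[0],0,0) already contains the target
-- (there A returns at depth 0 before ever indexing capacities[1]).
def Pre_ids_solve (capacities : List Int) (target : Int) : Prop :=
  3 ≤ capacities.length ∨
    (1 ≤ capacities.length ∧ (target = capacities.getD 0 0 ∨ target = 0))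
instance (capacities : List Int) (target : Int) : Decidable (Pre_ids_solve capacities target) := by
  unfold Pre_ids_solve; infer_instance

def pvWitness_ids_solve : List Int × Int := ([4, 3, 2], 2)

def Spec_ids_solve (capacities : List Int) (target : Int) (out : Option (List (Int × Int × Int))) : Prop := out = ids_solve_alt capacities target
instance (capacities : List Int) (target : Int) (out : Option (List (Int × Int × Int))) : Decidable (Spec_ids_solve capacities target out) := by unfold Spec_ids_solve; infer_instance

-- ===== CLAIM (what is proved, stated in full; the proofs are below) =====
def Claim_equal_ids_solve : Prop := ∀ (capacities : List Int) (target : Int), Dom_ids_solve capacities target → Pre_ids_solve capacities target → Spec_ids_solve capacities target (ids_solve capacities target)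

-- ===== LEMMAS AND PROOFS =====

-- `visited` only ever contains non-target states
def pvInv (target : Int) (v : PySem.Set (Int × Int × Int)) : Prop :=
  ∀ x ∈ v, pvHit target x = false

theorem pv_inv_add (target : Int) (v : PySem.Set (Int × Int × Int)) (s : Int × Int × Int)
    (hv : pvInv target v) (hs : pvHit target s = false) :
    pvInv target (PySem.Set.add v s) := by
  intro x hx
  rcases (PySem.Set.mem_add _ _ _).1 hx with h | h
  · exact hv x h
  · simpa [h] using hs

theorem pv_dls_inv (caps : List Int) (target : Int) :
    ∀ (d : Nat) (s : Int × Int × Int) (p : List (Int × Int × Int)) (v : PySem.Set (Int × Int × Int)),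
      pvInv target v → pvInv target (pv_dls caps target d s p v).2 := by
  intro d
  induction d with
  | zero =>
    intro s p v hv
    by_cases h : pvHit target s <;> simp [pv_dls, h] <;> exact hv
  | succ d ih =>
    intro s p v hv
    by_cases h : pvHit target s
    · simp [pv_dls, h]; exact hv
    · simp only [pv_dls, h, Bool.false_eq_true, if_false]
      have hadd : pvInv target (PySem.Set.add v s) :=
        pv_inv_add target v s hv (by simpa using h)
      generalize get_next_statesL s caps = cs
      generalize hacc : ((none : Option (List (Int × Int × Int))), PySem.Set.add v s) = acc
      have hacc2 : pvInv target acc.2 := by rw [← hacc]; exact hadd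
      clear hacc hadd hv h
      induction cs generalizing acc with
      | nil => simpa using hacc2
      | cons c cs ihc =>
        rw [List.foldl_cons]
        apply ihc
        rcases acc with ⟨o, v'⟩
        cases o with
        | some r => exact hacc2
        | none =>
          by_cases hc : c ∈ v'
          · simpa [hc] using hacc2
          · simpa [hc] using ih c (p ++ [s]) v' hacc2

theorem pv_foldl_some (caps : List Int) (target : Int) (d : Nat) (p : List (Int × Int × Int)) :
    ∀ (cs : List (Int × Int × Int)) (r : List (Int × Int × Int)) (v : PySem.Set (Int × Int × Int)),
      cs.foldl (fun acc c =>
        match acc with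
        | (some r, v') => (some r, v')
        | (none, v') => if c ∈ v' then (none, v') else pv_dls caps target d c p v')
        (some r, v) = (some r, v) := by
  intro cs
  induction cs with
  | nil => intro r v; rfl
  | cons c cs ih => intro r v; exact ih r v

theorem pv_loop (caps : List Int) (target : Int) (d : Nat) (p' : List (Int × Int × Int))
    (IH : ∀ (s : Int × Int × Int) (p : List (Int × Int × Int)) (v : PySem.Set (Int × Int × Int))
      (rest : List ((Int × Int × Int) × List (Int × Int × Int) × Nat)), pvInv target v → s ∉ v →
      pv_run caps target v ((s, p, d) :: rest) =
        (match pv_dls caps target d s p v with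
         | (some r, _) => some r
         | (none, v') => pv_run caps target v' rest)) :
    ∀ (cs : List (Int × Int × Int)) (v : PySem.Set (Int × Int × Int))
      (rest : List ((Int × Int × Int) × List (Int × Int × Int) × Nat)), pvInv target v →
      pv_run caps target v ((cs.map (fun c => (c, p', d))) ++ rest) =
        (match cs.foldl (fun acc c =>
            match acc with
            | (some r, v') => (some r, v')
            | (none, v') => if c ∈ v' then (none, v') else pv_dls caps target d c p' v')
            ((none : Option (List (Int × Int × Int))), v) with
         | (some r, _) => some r
         | (none, v') => pv_run caps target v' rest) := by
  intro cs
  induction cs with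
  | nil => intro v rest hv; simp
  | cons c cs ihc =>
    intro v rest hv
    rw [List.map_cons, List.cons_append, List.foldl_cons]
    by_cases hc : c ∈ v
    · have hhit : pvHit target c = false := hv c hc
      have hrun : pv_run caps target v ((c, p', d) :: (cs.map (fun c => (c, p', d)) ++ rest)) =
          pv_run caps target v (cs.map (fun c => (c, p', d)) ++ rest) := by
        by_cases hd : d = 0 <;> simp [pv_run, hhit, hd, hc]
      rw [hrun]
      simpa [hc] using ihc v rest hv
    · rw [IH c p' v (cs.map (fun c => (c, p', d)) ++ rest) hv hc]
      rcases hdls : pv_dls caps target d c p' v with ⟨o, v2⟩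
      cases o with
      | some r => simp [hc, hdls, pv_foldl_some]
      | none =>
        have hv2 : pvInv target v2 := by
          have := pv_dls_inv caps target d c p' v hv
          rwa [hdls] at this
        simpa [hc, hdls] using ihc v2 rest hv2

theorem pv_main (caps : List Int) (target : Int) :
    ∀ (d : Nat) (s : Int × Int × Int) (p : List (Int × Int × Int))
      (v : PySem.Set (Int × Int × Int)) (rest : List ((Int × Int × Int) × List (Int × Int × Int) × Nat)),
      pvInv target v → s ∉ v →
      pv_run caps target v ((s, p, d) :: rest) =
        (match pv_dls caps target d s p v with
         | (some r, _) => some r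
         | (none, v') => pv_run caps target v' rest) := by
  intro d
  induction d with
  | zero =>
    intro s p v rest hv hs
    by_cases h : pvHit target s <;> simp [pv_run, pv_dls, h]
  | succ d ih =>
    intro s p v rest hv hs
    by_cases h : pvHit target s
    · simp [pv_run, pv_dls, h]
    · have hhit : pvHit target s = false := by simpa using h
      have hrun : pv_run caps target v ((s, p, d + 1) :: rest) =
          pv_run caps target (PySem.Set.add v s)
            ((get_next_statesL s caps).map (fun c => (c, p ++ [s], d)) ++ rest) := by
        simp [pv_run, hhit, hs]
      rw [hrun]
      simp only [pv_dls, hhit, Bool.false_eq_true, if_false]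
      exact pv_loop caps target d (p ++ [s]) ih (get_next_statesL s caps)
        (PySem.Set.add v s) rest (pv_inv_add target v s hv hhit)

-- ===== VERDICT (by name: the statement is the Claim_ definition above) =====
theorem pv_run_nil (caps : List Int) (target : Int) (v : PySem.Set (Int × Int × Int)) :
    pv_run caps target v [] = none := by
  simp [pv_run]

theorem pv_depth_eq (caps : List Int) (target : Int) (d : Nat) :
    pv_run caps target PySem.Set.empty [((caps.getD 0 0, 0, 0), [], d)] =
      (pv_dls caps target d (caps.getD 0 0, 0, 0) [] PySem.Set.empty).1 := by
  have hinv : pvInv target PySem.Set.empty := by intro x hx; simp [PySem.Set.empty] at hx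
  have hmem : (caps.getD 0 0, (0 : Int), (0 : Int)) ∉ PySem.Set.empty := by
    simp [PySem.Set.empty]
  have h := pv_main caps target d (caps.getD 0 0, 0, 0) [] PySem.Set.empty [] hinv hmem
  rcases hdls : pv_dls caps target d (caps.getD 0 0, 0, 0) [] PySem.Set.empty with ⟨o, v2⟩
  rw [hdls] at h
  cases o with
  | some r => simpa using h
  | none => simpa [pv_run_nil] using h

theorem ids_solve_spec : Claim_equal_ids_solve := by
  intro caps target hdom hpre
  unfold Spec_ids_solve ids_solve ids_solve_alt
  generalize PySem.List.pyRange 0 100 1 = l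
  suffices h : ∀ (l : List Int) (acc : Option (List (Int × Int × Int))),
      l.foldl (fun acc depth =>
        match acc with
        | some r => some r
        | none => (pv_dls caps target depth.toNat (caps.getD 0 0, 0, 0) []
            PySem.Set.empty).1) acc =
      l.foldl (fun acc depth =>
        match acc with
        | some r => some r
        | none => pv_run caps target PySem.Set.empty
            [((caps.getD 0 0, 0, 0), [], depth.toNat)]) acc by
    exact h l none
  intro l
  induction l with
  | nil => intro acc; rfl
  | cons x l ih =>
    intro acc
    rw [List.foldl_cons, List.foldl_cons]
    have hstep : (match acc with
        | some r => some r
        | none => (pv_dls caps target x.toNat (caps.getD 0 0, 0, 0) []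
            PySem.Set.empty).1) =
        (match acc with
        | some r => some r
        | none => pv_run caps target PySem.Set.empty
            [((caps.getD 0 0, 0, 0), [], x.toNat)]) := by
      cases acc with
      | some r => rfl
      | none => exact (pv_depth_eq caps target x.toNat).symm
    rw [hstep]
    exact ih _
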